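-- pv_equiv track=rewrite | github.com/kruthar/euler | functions.py | gmgHelper
-- ===== SOURCE A (Python) =====
-- def gmgHelper(list):
--     if len(list) == 0:
--         return [[]]
--     groups = []
--     for g in gmgHelper(list[1:]):
--         added = sorted(g[:] + [list[0]])
--         if added not in groups:
--             groups.append(added)
--         for i, item in enumerate(g):
--             mult = g[:]
--             mult[i] = mult[i] * list[0]
--             mult.sort()
--             if mult not in groups:
--                 groups.append(mult)
--     return groups
--     '''
--     for i in range(1, len(list) + 1):
--         temp = list[i:]
--         for sub in gmgHelper(temp):
--             g = sorted([prodList(list[0:i])] + sub)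
--             if g not in groups:
--                 groups.append(g)
--     return groups
--     '''
-- ===== SOURCE B (Python) =====
-- def gmgHelper(list):
--     # Iterative fold: process elements back-to-front, rebuilding the grouping
--     # list at each step (same values and order as the recursive version).
--     result = [[]]
--     for x in reversed(list):
--         nxt = []
--         for g in result:
--             added = sorted(g + [x])
--             if added not in nxt:
--                 nxt.append(added)
--             for i in range(len(g)):
--                 mult = sorted(g[:i] + [g[i] * x] + g[i + 1:])
--                 if mult not in nxt:
--                     nxt.append(mult)
--         result = nxt
--     return result
-- ===== Notes on version B (the rewrite author's own statement) =====
-- stated objective: alternative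
-- what changed: Replaced the head-recursive definition by an iterative fold that starts from the singleton empty grouping and folds the elements in reversed order, rebuilding the grouping list with an explicit accumulator (and splice-based per-index multiplication) instead of recursion on the tail.
import Mathlib
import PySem

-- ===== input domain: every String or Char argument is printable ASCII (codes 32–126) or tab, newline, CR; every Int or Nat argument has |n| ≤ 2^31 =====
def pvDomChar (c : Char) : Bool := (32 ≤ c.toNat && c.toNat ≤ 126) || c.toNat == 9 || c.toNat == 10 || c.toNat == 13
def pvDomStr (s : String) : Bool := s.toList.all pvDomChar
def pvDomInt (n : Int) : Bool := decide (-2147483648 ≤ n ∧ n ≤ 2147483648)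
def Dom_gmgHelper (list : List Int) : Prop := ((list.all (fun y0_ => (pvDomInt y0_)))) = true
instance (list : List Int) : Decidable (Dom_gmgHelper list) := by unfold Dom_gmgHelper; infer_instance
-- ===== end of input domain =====

-- B rewrites A's head recursion as an iterative fold over the reversed list (alternative decomposition, same cost).

-- ===== PORT A =====
def gmgHelper : List Int → List (List Int)
  | [] => [[]]
  | x :: rest =>
    (gmgHelper rest).foldl
      (fun groups g =>
        let added := PySem.List.sorted (g ++ [x]) (fun v => v)
        let groups := if added ∈ groups then groups else groups ++ [added]
        (PySem.List.enumerate g 0).foldl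
          (fun groups p =>
            let mult := PySem.List.pySetD g p.1 (p.2 * x)
            let mult := PySem.List.sorted mult (fun v => v)
            if mult ∈ groups then groups else groups ++ [mult])
          groups)
      []

-- ===== PORT B =====
def gmgInsert (gs : List (List Int)) (g : List Int) : List (List Int) :=
  if g ∈ gs then gs else gs ++ [g]

def gmgStep (x : Int) (res : List (List Int)) : List (List Int) :=
  res.foldl
    (fun nxt g =>
      (List.range g.length).foldl
        (fun nxt i =>
          gmgInsert nxt (PySem.List.sorted (g.take i ++ [g.getD i 0 * x] ++ g.drop (i + 1)) (fun v => v)))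
        (gmgInsert nxt (PySem.List.sorted (g ++ [x]) (fun v => v))))
    []

def gmgHelper_alt (list : List Int) : List (List Int) :=
  list.reverse.foldl (fun res x => gmgStep x res) [[]]

-- ===== PRECONDITION & SPEC =====
def Spec_gmgHelper (list : List Int) (out : List (List Int)) : Prop := out = gmgHelper_alt list
instance (list : List Int) (out : List (List Int)) : Decidable (Spec_gmgHelper list out) := by unfold Spec_gmgHelper; infer_instance

-- ===== CLAIM (what is proved, stated in full; the proofs are below) =====
def Claim_equal_gmgHelper : Prop := ∀ (list : List Int), Dom_gmgHelper list → Spec_gmgHelper list (gmgHelper list)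

-- ===== LEMMAS AND PROOFS =====

-- the inner per-index fold: A's enumerate/pySetD form equals B's range/splice form
theorem gmg_inner_eq (x : Int) (g : List Int) :
    ∀ (s : Nat) (t : List Int), t = g.drop s → ∀ (acc : List (List Int)),
      (PySem.List.enumerate t (s : Int)).foldl
        (fun groups p =>
          let mult := PySem.List.pySetD g p.1 (p.2 * x)
          let mult := PySem.List.sorted mult (fun v => v)
          if mult ∈ groups then groups else groups ++ [mult]) acc
      = (List.range' s t.length).foldl
        (fun nxt i =>
          gmgInsert nxt (PySem.List.sorted (g.take i ++ [g.getD i 0 * x] ++ g.drop (i + 1)) (fun v => v))) acc := by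
  intro s t
  induction t generalizing s with
  | nil => intro _ acc; simp [PySem.List.enumerate]
  | cons a t ih =>
    intro ht acc
    have hs : s < g.length := by
      by_contra h
      have : g.drop s = [] := List.drop_eq_nil_of_le (by omega)
      rw [this] at ht; exact absurd ht (by simp)
    have hsome : g[s]? = some a := by
      have h2 : (g.drop s)[0]? = some a := by rw [← ht]; simp
      rw [List.getElem?_drop] at h2; simpa using h2
    have ha : g.getD s 0 = a := by
      rw [List.getD_eq_getElem?_getD, hsome]; rfl
    have hset : g.set s (a * x) = g.take s ++ [g.getD s 0 * x] ++ g.drop (s + 1) := by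
      rw [ha, List.set_eq_take_append_cons_drop]
      simp [hs]
    have ht' : t = g.drop (s + 1) := by
      have := congrArg List.tail ht
      simpa [List.tail_drop] using this
    rw [PySem.List.enumerate_cons, List.length_cons, List.range'_succ, List.foldl_cons, List.foldl_cons]
    have hstep :
        (let mult := PySem.List.pySetD g ((s : Int)) (a * x)
         let mult := PySem.List.sorted mult (fun v => v)
         if mult ∈ acc then acc else acc ++ [mult])
        = gmgInsert acc (PySem.List.sorted (g.take s ++ [g.getD s 0 * x] ++ g.drop (s + 1)) (fun v => v)) := by
      simp only [PySem.List.pySetD_natCast, hset, gmgInsert]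
    rw [hstep]
    have : ((s : Int) + 1) = (((s + 1 : Nat)) : Int) := by push_cast; ring
    rw [this]
    exact ih (s + 1) ht' _

-- one unfolding of A equals one B step applied to the recursive result
theorem gmg_cons_eq (x : Int) (rest : List Int) :
    gmgHelper (x :: rest) = gmgStep x (gmgHelper rest) := by
  show (gmgHelper rest).foldl _ [] = (gmgHelper rest).foldl _ []
  congr 1
  funext groups g
  simp only
  have := gmg_inner_eq x g 0 g (by simp)
    (let added := PySem.List.sorted (g ++ [x]) (fun v => v)
     if added ∈ groups then groups else groups ++ [added])
  simp only [Int.natCast_zero] at this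
  rw [this, List.range_eq_range']
  rfl

theorem gmg_eq (list : List Int) :
    gmgHelper list = list.reverse.foldl (fun res x => gmgStep x res) [[]] := by
  induction list with
  | nil => rfl
  | cons x rest ih =>
    rw [gmg_cons_eq, List.reverse_cons, List.foldl_append, List.foldl_cons, List.foldl_nil, ← ih]

-- ===== VERDICT (by name: the statement is the Claim_ definition above) =====
theorem gmgHelper_spec : Claim_equal_gmgHelper := by
  intro list _
  show gmgHelper list = gmgHelper_alt list
  rw [gmg_eq]; rfl
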